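-- pv_equiv track=rewrite | github.com/msimmara/NoSpeulers | Euler/Euler62.py | checkIfPerm
-- ===== SOURCE A (Python) =====
-- def checkIfPerm(n,m):
--     nStr = str(n)
--     mStr = str(m)
--     if(len(nStr)!=len(mStr)):
--         return False
--
--     nBucket = [0 for i in range(0,10)]
--     mBucket = [0 for i in range(0,10)]
--
--     for dig in nStr:
--         intDig = int(dig)
--         nBucket[intDig]+=1
--
--     for dig in mStr:
--         intDig = int(dig)
--         mBucket[intDig]+=1
--
--     for i in range(0,10):
--         if(nBucket[i]!=mBucket[i]):
--             return False
--
--     return True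
-- ===== SOURCE B (Python) =====
-- def checkIfPerm(n, m):
--     nStr = str(n)
--     mStr = str(m)
--     if len(nStr) != len(mStr):
--         return False
--     return sorted(int(d) for d in nStr) == sorted(int(d) for d in mStr)
-- ===== Notes on version B (the rewrite author's own statement) =====
-- stated objective: simpler
-- what changed: Replaces the two 10-slot bucket arrays and the bucket-comparison loop with a single comparison of the sorted digit sequences (after the same length guard and the same per-character int() conversion).
import Mathlib
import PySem

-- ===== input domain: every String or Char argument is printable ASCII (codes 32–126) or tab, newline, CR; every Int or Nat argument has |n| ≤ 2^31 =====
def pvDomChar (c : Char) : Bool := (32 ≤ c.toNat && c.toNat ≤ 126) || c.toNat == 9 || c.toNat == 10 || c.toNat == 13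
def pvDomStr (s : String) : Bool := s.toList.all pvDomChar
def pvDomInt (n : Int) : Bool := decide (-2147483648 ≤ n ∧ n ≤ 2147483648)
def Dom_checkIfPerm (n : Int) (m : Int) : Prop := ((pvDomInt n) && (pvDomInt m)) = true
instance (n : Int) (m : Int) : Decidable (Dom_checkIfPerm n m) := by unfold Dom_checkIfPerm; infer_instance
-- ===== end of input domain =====

-- B replaces A's two 10-slot digit buckets and bucket-comparison loop by comparing the sorted digit lists (same length guard, same per-char int() conversion); objective: simpler.


-- ===== PORT A =====
-- one loop iteration of A: intDig = int(dig); bucket[intDig] += 1  (none = ValueError / IndexError)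
def pvBucketStep? (b : List Int) (c : Char) : Option (List Int) :=
  match PySem.Int.ofChars? [c] with
  | none => none
  | some d => PySem.List.pySet? b d (PySem.List.pyGetD b d 0 + 1)

-- A's loop "for dig in s: intDig = int(dig); bucket[intDig] += 1"
def pvFillBucket? : List Char → List Int → Option (List Int)
  | [], b => some b
  | c :: cs, b =>
    match pvBucketStep? b c with
    | none => none
    | some b' => pvFillBucket? cs b'

def checkIfPerm (n : Int) (m : Int) : Bool :=
  let nStr := PySem.Int.toChars n
  let mStr := PySem.Int.toChars m
  if nStr.length ≠ mStr.length then false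
  else
    match pvFillBucket? nStr ((PySem.List.pyRange 0 10 1).map (fun _ => (0 : Int))),
          pvFillBucket? mStr ((PySem.List.pyRange 0 10 1).map (fun _ => (0 : Int))) with
    | some nB, some mB =>
      -- "for i in range(0,10): if nBucket[i] != mBucket[i]: return False / return True"
      (PySem.List.pyRange 0 10 1).all
        (fun i => PySem.List.pyGetD nB i 0 == PySem.List.pyGetD mB i 0)
    | _, _ => false

-- ===== PORT B =====
-- B's "[int(d) for d in s]" with none = ValueError
def pvDigits? : List Char → Option (List Int)
  | [] => some []
  | c :: cs =>
    match PySem.Int.ofChars? [c] with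
    | none => none
    | some d =>
      match pvDigits? cs with
      | none => none
      | some ds => some (d :: ds)

def checkIfPerm_alt (n : Int) (m : Int) : Bool :=
  let nStr := PySem.Int.toChars n
  let mStr := PySem.Int.toChars m
  if nStr.length ≠ mStr.length then false
  else
    match pvDigits? nStr with
    | none => false
    | some a =>
      match pvDigits? mStr with
      | none => false
      | some b =>
        PySem.List.sorted a (fun x => x) false == PySem.List.sorted b (fun x => x) false

-- ===== PRECONDITION & SPEC =====
-- Pre_ excludes exactly the inputs where A raises ValueError (int('-') on a negative argument
-- whose str() has the same length as the other's); B raises the same ValueError there.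
def Pre_checkIfPerm (n : Int) (m : Int) : Prop :=
  (0 ≤ n ∧ 0 ≤ m) ∨ (PySem.Int.toChars n).length ≠ (PySem.Int.toChars m).length
instance (n : Int) (m : Int) : Decidable (Pre_checkIfPerm n m) := by unfold Pre_checkIfPerm; infer_instance

def pvWitness_checkIfPerm : Int × Int := (125, 512)

def Spec_checkIfPerm (n : Int) (m : Int) (out : Bool) : Prop := out = checkIfPerm_alt n m
instance (n : Int) (m : Int) (out : Bool) : Decidable (Spec_checkIfPerm n m out) := by unfold Spec_checkIfPerm; infer_instance

-- ===== CLAIM (what is proved, stated in full; the proofs are below) =====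
def Claim_equal_checkIfPerm : Prop := ∀ (n : Int) (m : Int), Dom_checkIfPerm n m → Pre_checkIfPerm n m → Spec_checkIfPerm n m (checkIfPerm n m)

-- ===== LEMMAS AND PROOFS =====

-- the digit value of a char (0 if int(dig) fails)
def pvVal (c : Char) : Int := (PySem.Int.ofChars? [c]).getD 0

-- a char on which int(dig) succeeds with a digit value
def pvDigitOk (c : Char) : Prop :=
  PySem.Int.ofChars? [c] = some (pvVal c) ∧ (0 ≤ pvVal c ∧ pvVal c < 10)

theorem pv_mem_toDigitsCore (fuel k : Nat) (acc : List Char) (c : Char)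
    (hacc : ∀ x ∈ acc, pvDigitOk x) (h : c ∈ Nat.toDigitsCore 10 fuel k acc) : pvDigitOk c := by
  induction fuel generalizing k acc with
  | zero => simp [Nat.toDigitsCore] at h; exact hacc c h
  | succ fuel ih =>
    have hd : pvDigitOk (Nat.digitChar (k % 10)) := by
      have hk : k % 10 < 10 := Nat.mod_lt _ (by omega)
      interval_cases h' : k % 10 <;> (unfold pvDigitOk; decide)
    simp only [Nat.toDigitsCore] at h
    split at h
    · rcases List.mem_cons.mp h with h | h
      · exact h ▸ hd
      · exact hacc c h
    · exact ih (k / 10) _ (by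
        intro x hx
        rcases List.mem_cons.mp hx with h | h
        · exact h ▸ hd
        · exact hacc x h) h

theorem pv_toChars_digits (n : Int) (hn : 0 ≤ n) : ∀ c ∈ PySem.Int.toChars n, pvDigitOk c := by
  intro c hc
  unfold PySem.Int.toChars at hc
  rw [if_neg (by omega)] at hc
  exact pv_mem_toDigitsCore _ _ _ _ (by simp) hc

theorem pv_val_range (c : Char) (h : pvDigitOk c) : 0 ≤ pvVal c ∧ pvVal c < 10 := h.2

theorem pv_digits?_eq (cs : List Char) (h : ∀ c ∈ cs, pvDigitOk c) :
    pvDigits? cs = some (cs.map pvVal) := by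
  induction cs with
  | nil => rfl
  | cons c cs ih =>
    obtain ⟨hsome, _, _⟩ := h c (by simp)
    simp only [pvDigits?, hsome, ih (fun x hx => h x (by simp [hx])), List.map_cons]

theorem pv_fillBucket (cs : List Char) (h : ∀ c ∈ cs, pvDigitOk c) :
    ∀ b : List Int, b.length = 10 →
    ∃ b', pvFillBucket? cs b = some b' ∧ b'.length = 10 ∧
      ∀ i : Int, 0 ≤ i → i < 10 →
        PySem.List.pyGetD b' i 0 = PySem.List.pyGetD b i 0 + ((cs.map pvVal).count i : Int) := by
  induction cs with
  | nil => exact fun b hb => ⟨b, rfl, hb, by simp⟩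
  | cons c cs ih =>
    intro b hb
    obtain ⟨hsome, hd0, hd10⟩ := h c (by simp)
    set d := pvVal c with hval
    have hlt : d.toNat < b.length := by omega
    have hcast : ((d.toNat : Nat) : Int) = d := Int.toNat_of_nonneg hd0
    have hset := PySem.List.pySet?_natCast b d.toNat (PySem.List.pyGetD b d 0 + 1) hlt
    rw [hcast] at hset
    have hstep : pvBucketStep? b c = some (b.set d.toNat (PySem.List.pyGetD b d 0 + 1)) := by
      simp only [pvBucketStep?, hsome, hset]
    set b1 := b.set d.toNat (PySem.List.pyGetD b d 0 + 1) with hb1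
    have hb1len : b1.length = 10 := by simp [hb1, hb]
    obtain ⟨b', hfill, hlen, hcnt⟩ := ih (fun x hx => h x (by simp [hx])) b1 hb1len
    refine ⟨b', by simp only [pvFillBucket?, hstep]; exact hfill, hlen, ?_⟩
    intro i hi0 hi10
    have hicast : ((i.toNat : Nat) : Int) = i := Int.toNat_of_nonneg hi0
    have hget1 := PySem.List.pyGetD_pySetD_natCast b d.toNat i.toNat (PySem.List.pyGetD b d 0 + 1) 0 hlt
    rw [PySem.List.pySetD_natCast, hicast] at hget1
    rw [hcnt i hi0 hi10, hget1, List.map_cons, List.count_cons, ← hval]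
    by_cases hde : i = d
    · rw [if_pos (by omega), hde, if_pos (by simp)]
      push_cast; ring
    · rw [if_neg (by omega), if_neg (by simp [Ne.symm hde])]
      push_cast; ring

theorem pv_base_len : ((PySem.List.pyRange 0 10 1).map (fun _ => (0 : Int))).length = 10 := by decide

theorem pv_base_zero (i : Int) (h0 : 0 ≤ i) (h10 : i < 10) :
    PySem.List.pyGetD ((PySem.List.pyRange 0 10 1).map (fun _ => (0 : Int))) i 0 = 0 := by
  interval_cases i <;> decide

-- ===== VERDICT (by name: the statement is the Claim_ definition above) =====
theorem checkIfPerm_spec : Claim_equal_checkIfPerm := by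
  intro n m _ hpre
  unfold Spec_checkIfPerm
  by_cases hlen : (PySem.Int.toChars n).length = (PySem.Int.toChars m).length
  · rcases hpre with ⟨hn, hm⟩ | hne
    · have hN := pv_toChars_digits n hn
      have hM := pv_toChars_digits m hm
      obtain ⟨nB, hfN, _, hcN⟩ := pv_fillBucket _ hN _ pv_base_len
      obtain ⟨mB, hfM, _, hcM⟩ := pv_fillBucket _ hM _ pv_base_len
      simp only [checkIfPerm, checkIfPerm_alt, if_neg (by omega : ¬ (PySem.Int.toChars n).length ≠ (PySem.Int.toChars m).length),
        hfN, hfM, pv_digits?_eq _ hN, pv_digits?_eq _ hM]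
      set dsN := (PySem.Int.toChars n).map pvVal with hdsN
      set dsM := (PySem.Int.toChars m).map pvVal with hdsM
      rw [Bool.eq_iff_iff]
      simp only [List.all_eq_true, beq_iff_eq, PySem.List.sorted_id_eq_sorted_id_iff_perm]
      have hcount : ∀ i : Int, 0 ≤ i → i < 10 →
          (PySem.List.pyGetD nB i 0 = PySem.List.pyGetD mB i 0 ↔ dsN.count i = dsM.count i) := by
        intro i h0 h10
        rw [hcN i h0 h10, hcM i h0 h10, pv_base_zero i h0 h10]
        constructor
        · intro h; exact_mod_cast by omega
        · intro h; omega
      constructor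
      · intro hall
        rw [List.perm_iff_count]
        intro a
        by_cases ha : 0 ≤ a ∧ a < 10
        · exact (hcount a ha.1 ha.2).mp (hall a (PySem.List.mem_pyRange_one.mpr ha))
        · have hzN : dsN.count a = 0 := by
            rw [List.count_eq_zero]
            intro hmem
            obtain ⟨c, hc, hval⟩ := List.mem_map.mp hmem
            have := pv_val_range c (hN c hc); omega
          have hzM : dsM.count a = 0 := by
            rw [List.count_eq_zero]
            intro hmem
            obtain ⟨c, hc, hval⟩ := List.mem_map.mp hmem
            have := pv_val_range c (hM c hc); omega
          rw [hzN, hzM]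
      · intro hperm i hi
        have hi' := PySem.List.mem_pyRange_one.mp hi
        exact (hcount i hi'.1 hi'.2).mpr (List.perm_iff_count.mp hperm i)
    · exact absurd hlen hne
  · simp [checkIfPerm, checkIfPerm_alt, hlen]
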